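-- pv_equiv track=rewrite | github.com/reyco2000/Vintage-Image-Viewer | vintage_image_viewer.py | _decompress_packbits_for_pntg
-- ===== SOURCE A (Python) =====
-- def _decompress_packbits_for_pntg(data, width, height):
--     """Decompress PackBits compressed data for PNTG format (same as MacPaint)"""
--     pixels = []
--     bits = []
--     i = 0
--
--     while i < len(data) and len(bits) < width * height:
--         if i >= len(data):
--             break
--
--         flag = data[i]
--
--         if flag < 128:
--             # Literal run: copy next (flag + 1) bytes
--             count = flag + 1
--             i += 1
--             for j in range(count):
--                 if i < len(data):
--                     byte = data[i]
--                     # Expand bits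
--                     for bit in range(7, -1, -1):
--                         bits.append(1 if (byte >> bit) & 1 else 0)
--                     i += 1
--         elif flag > 128:
--             # Repeat run: repeat next byte (257 - flag) times
--             count = 257 - flag
--             i += 1
--             if i < len(data):
--                 byte = data[i]
--                 for _ in range(count):
--                     # Expand bits
--                     for bit in range(7, -1, -1):
--                         bits.append(1 if (byte >> bit) & 1 else 0)
--                 i += 1
--         else:
--             # flag == 128: no-op
--             i += 1
--
--     # Convert bits to pixels (0 = white, 1 = black)
--     pixels = [255 if bit == 0 else 0 for bit in bits[:width * height]]
--
--     # Pad if needed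
--     while len(pixels) < width * height:
--         pixels.append(255)
--
--     return pixels[:width * height]
-- ===== SOURCE B (Python) =====
-- def _decompress_packbits_for_pntg(data, width, height):
--     """Decompress PackBits data for PNTG: decode bytes first, then expand only the needed bytes to pixels."""
--     n = max(width * height, 0)
--
--     # Pass 1: PackBits byte decode (no bit handling at all).
--     out = []
--     i = 0
--     L = len(data)
--     while i < L:
--         flag = data[i]
--         i += 1
--         if flag < 128:
--             cnt = flag + 1
--             if cnt > 0:
--                 out.extend(data[i:i + cnt])
--                 i += cnt
--         elif flag > 128:
--             if i < L:
--                 out.extend([data[i]] * max(257 - flag, 0))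
--                 i += 1
--         # flag == 128: no-op
--
--     # Pass 2: expand just enough bytes to bits, mapped to pixels (0-bit -> 255, 1-bit -> 0).
--     pixels = []
--     for byte in out[:(n + 7) // 8]:
--         for c in format(byte % 256, '08b'):
--             pixels.append(255 if c == '0' else 0)
--     pixels = pixels[:n]
--     pixels.extend([255] * (n - len(pixels)))
--     return pixels
-- ===== Notes on version B (the rewrite author's own statement) =====
-- stated objective: alternative
-- what changed: B decodes the PackBits byte stream in one pass (copying literal runs by slicing and repeat runs by list multiplication) and only afterwards expands just the ceil(n/8) needed bytes into pixel bits, instead of A's interleaved per-byte bit-expansion inside the decode loop with an early-stop check.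
import Mathlib
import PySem

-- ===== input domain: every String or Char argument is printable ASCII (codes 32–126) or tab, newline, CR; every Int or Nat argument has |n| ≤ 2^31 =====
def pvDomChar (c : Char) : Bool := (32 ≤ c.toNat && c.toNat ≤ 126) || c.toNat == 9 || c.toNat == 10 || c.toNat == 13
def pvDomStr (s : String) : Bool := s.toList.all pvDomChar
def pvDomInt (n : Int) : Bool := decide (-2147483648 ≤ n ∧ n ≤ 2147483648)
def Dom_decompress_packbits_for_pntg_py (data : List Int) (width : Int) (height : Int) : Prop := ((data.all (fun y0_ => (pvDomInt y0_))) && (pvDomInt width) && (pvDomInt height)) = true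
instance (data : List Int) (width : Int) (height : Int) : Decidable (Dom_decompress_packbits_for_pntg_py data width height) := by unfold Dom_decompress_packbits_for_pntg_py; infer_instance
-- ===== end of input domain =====

-- B splits A's interleaved loop into a PackBits byte-decode pass followed by a bounded bit-expansion pass (alternative decomposition; return value only, no mutation).

-- ===== PORT A =====

-- inner 'for bit in range(7,-1,-1): bits.append(1 if (byte >> bit) & 1 else 0)'
def pvExpandA (byte : Int) (bits : List Int) : List Int :=
  (PySem.List.pyRange 7 (-1) (-1)).foldl
    (fun acc bit => acc ++ [if PySem.Int.band (byte >>> bit.toNat) 1 ≠ 0 then (1 : Int) else 0]) bits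

-- literal run: 'for j in range(count): if i < len(data): ... i += 1' over the suffix after the flag
def pvLitrunA (count : Int) (rest : List Int) (bits : List Int) : List Int × List Int :=
  if count ≤ 0 then (rest, bits)
  else match rest with
    | [] => ([], bits)
    | b :: rs => pvLitrunA (count - 1) rs (pvExpandA b bits)
termination_by count.toNat
decreasing_by omega

-- repeat run: 'for _ in range(count): expand byte'
def pvRepRunA (count : Int) (byte : Int) (bits : List Int) : List Int :=
  if count ≤ 0 then bits
  else pvRepRunA (count - 1) byte (pvExpandA byte bits)
termination_by count.toNat
decreasing_by omega

theorem pvLitrunA_fst_length (count : Int) (rest bits : List Int) :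
    (pvLitrunA count rest bits).1.length ≤ rest.length := by
  fun_induction pvLitrunA count rest bits with
  | case1 => simp
  | case2 => simp
  | case3 c b rs bits h ih => simp [List.length_cons]; omega

-- the outer while loop, over the suffix of data starting at index i
def pvLoopA (rest : List Int) (bits : List Int) (target : Int) : List Int :=
  match rest with
  | [] => bits
  | flag :: rs =>
    if (bits.length : Int) < target then
      if flag < 128 then
        let p := pvLitrunA (flag + 1) rs bits
        pvLoopA p.1 p.2 target
      else if 128 < flag then
        match rs with
        | [] => bits            -- i was advanced past the end: while condition fails
        | b :: rs' => pvLoopA rs' (pvRepRunA (257 - flag) b bits) target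
      else pvLoopA rs bits target
    else bits
termination_by rest.length
decreasing_by
  · have := pvLitrunA_fst_length (flag + 1) rs bits; simpa using Nat.lt_succ_of_le this
  · simp
  · simp

def decompress_packbits_for_pntg_py (data : List Int) (width : Int) (height : Int) : List Int :=
  let bits := pvLoopA data [] (width * height)
  let pixels := (PySem.List.slice bits none (some (width * height))).map
    (fun bit => if bit = 0 then (255 : Int) else 0)
  -- 'while len(pixels) < width*height: pixels.append(255)'
  let pixels := pixels ++ List.replicate (width * height - (pixels.length : Int)).toNat 255
  PySem.List.slice pixels none (some (width * height))

-- ===== PORT B =====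

-- pass 1: PackBits byte decode, over the suffix of data
def pvDecodeB (rest : List Int) (out : List Int) : List Int :=
  match rest with
  | [] => out
  | flag :: rs =>
    if flag < 128 then
      if 0 < flag + 1 then
        pvDecodeB (rs.drop (flag + 1).toNat) (out ++ PySem.List.slice rs none (some (flag + 1)))
      else pvDecodeB rs out
    else if 128 < flag then
      match rs with
      | [] => out
      | b :: rs' => pvDecodeB rs' (out ++ List.replicate (max (257 - flag) 0).toNat b)
    else pvDecodeB rs out
termination_by rest.length
decreasing_by all_goals (simp [List.length_drop]; try omega)

-- "for c in format(m, '08b'): pixels.append(255 if c == '0' else 0)" fused: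
-- builds the 8 binary digits of m (0 ≤ m < 256) back to front by repeated halving; exact on that domain
def pvByteBitsB : Nat → Int → List Int → List Int
  | 0, _, acc => acc
  | k + 1, m, acc => pvByteBitsB k (m / 2) ((if m % 2 = 0 then (255 : Int) else 0) :: acc)

def decompress_packbits_for_pntg_py_alt (data : List Int) (width : Int) (height : Int) : List Int :=
  let n := max (width * height) 0
  let out := pvDecodeB data []
  -- pass 2: expand only the needed bytes: out[:(n + 7) // 8]
  let pixels := (out.take (PySem.Int.floordiv (n + 7) 8).toNat).foldl
    (fun acc b => acc ++ pvByteBitsB 8 (PySem.Int.mod b 256) []) []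
  let pixels := pixels.take n.toNat
  pixels ++ List.replicate (n.toNat - pixels.length) 255

-- ===== PRECONDITION & SPEC =====
def Spec_decompress_packbits_for_pntg_py (data : List Int) (width : Int) (height : Int) (out : List Int) : Prop := out = decompress_packbits_for_pntg_py_alt data width height
instance (data : List Int) (width : Int) (height : Int) (out : List Int) : Decidable (Spec_decompress_packbits_for_pntg_py data width height out) := by unfold Spec_decompress_packbits_for_pntg_py; infer_instance

-- ===== CLAIM (what is proved, stated in full; the proofs are below) =====
def Claim_equal_decompress_packbits_for_pntg_py : Prop := ∀ (data : List Int) (width : Int) (height : Int), Dom_decompress_packbits_for_pntg_py data width height → Spec_decompress_packbits_for_pntg_py data width height (decompress_packbits_for_pntg_py data width height)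

-- ===== LEMMAS AND PROOFS =====

def pvBit1 (b : Int) (k : Int) : Int := if PySem.Int.band (b >>> k.toNat) 1 ≠ 0 then 1 else 0
def pvBitsOf (b : Int) : List Int :=
  [pvBit1 b 7, pvBit1 b 6, pvBit1 b 5, pvBit1 b 4, pvBit1 b 3, pvBit1 b 2, pvBit1 b 1, pvBit1 b 0]
def pvFlatBits (l : List Int) : List Int := l.flatMap pvBitsOf
def pvPix (bit : Int) : Int := if bit = 0 then 255 else 0

theorem pvExpandA_eq (b : Int) (bits : List Int) : pvExpandA b bits = bits ++ pvBitsOf b := by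
  have h : PySem.List.pyRange 7 (-1) (-1) = [7,6,5,4,3,2,1,0] := by decide
  simp only [pvExpandA, h, List.foldl, pvBitsOf, pvBit1, List.append_assoc, List.cons_append,
    List.nil_append, Int.shiftRight_natCast_right]

theorem pvByteBitsB_eq (b : Int) : pvByteBitsB 8 (PySem.Int.mod b 256) [] = (pvBitsOf b).map pvPix := by
  rw [PySem.Int.mod_eq_emod_of_pos (by norm_num)]
  simp only [pvByteBitsB, pvBitsOf, pvPix, pvBit1, List.map, PySem.Int.band_one,
    PySem.Int.mod_eq_emod_of_pos (show (0:Int) < 2 by norm_num), Int.shiftRight_eq_div_pow,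
    show ((2^((7:Int).toNat) : Nat) : Int) = 128 by decide,
    show ((2^((6:Int).toNat) : Nat) : Int) = 64 by decide,
    show ((2^((5:Int).toNat) : Nat) : Int) = 32 by decide,
    show ((2^((4:Int).toNat) : Nat) : Int) = 16 by decide,
    show ((2^((3:Int).toNat) : Nat) : Int) = 8 by decide,
    show ((2^((2:Int).toNat) : Nat) : Int) = 4 by decide,
    show ((2^((1:Int).toNat) : Nat) : Int) = 2 by decide,
    show ((2^((0:Int).toNat) : Nat) : Int) = 1 by decide,
    Int.ediv_one, ne_eq, ite_not, List.cons.injEq, and_true]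
  refine ⟨?_,?_,?_,?_,?_,?_,?_,?_⟩ <;> (split_ifs <;> first | rfl | omega)

theorem pvLitrunA_eq (count : Int) (rest bits : List Int) :
    pvLitrunA count rest bits = (rest.drop count.toNat, bits ++ pvFlatBits (rest.take count.toNat)) := by
  fun_induction pvLitrunA count rest bits with
  | case1 c rs bs =>
    have : c.toNat = 0 := by omega
    simp [this, pvFlatBits]
  | case2 c bs h => simp [pvFlatBits]
  | case3 c bs h b rs ih =>
    have h1 : c.toNat = (c - 1).toNat + 1 := by omega
    rw [ih, h1]
    simp [pvFlatBits, pvExpandA_eq]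

theorem pvRepRunA_eq (count : Int) (byte : Int) (bits : List Int) :
    pvRepRunA count byte bits = bits ++ pvFlatBits (List.replicate count.toNat byte) := by
  fun_induction pvRepRunA count byte bits with
  | case1 c bs =>
    have : c.toNat = 0 := by omega
    simp [this, pvFlatBits]
  | case2 c bs h ih =>
    have h1 : c.toNat = (c - 1).toNat + 1 := by omega
    rw [ih, h1, List.replicate_succ]
    simp [pvFlatBits, pvExpandA_eq]

def pvDecodePure : List Int → List Int
  | [] => []
  | flag :: rs =>
    if flag < 128 then
      if 0 < flag + 1 then
        PySem.List.slice rs none (some (flag + 1)) ++ pvDecodePure (rs.drop (flag + 1).toNat)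
      else pvDecodePure rs
    else if 128 < flag then
      match rs with
      | [] => []
      | b :: rs' => List.replicate (max (257 - flag) 0).toNat b ++ pvDecodePure rs'
    else pvDecodePure rs
termination_by rest => rest.length
decreasing_by all_goals (simp [List.length_drop]; try omega)

theorem pvDecodeB_pure (rest out : List Int) : pvDecodeB rest out = out ++ pvDecodePure rest := by
  fun_induction pvDecodeB rest out with
  | case1 out => simp [pvDecodePure]
  | case2 out flag rs h hc ih =>
    rw [ih]
    conv_rhs => rw [pvDecodePure.eq_def]
    simp only [if_pos h, if_pos hc, List.append_assoc]
  | case3 out flag rs h hc ih =>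
    rw [ih]
    conv_rhs => rw [pvDecodePure.eq_def]
    simp only [if_pos h, if_neg hc]
  | case4 out flag h h' =>
    conv_rhs => rw [pvDecodePure.eq_def]
    simp only [if_neg h, if_pos h', List.append_nil]
  | case5 out flag h h' b rs' ih =>
    rw [ih]
    conv_rhs => rw [pvDecodePure.eq_def]
    simp only [if_neg h, if_pos h', List.append_assoc]
  | case6 out flag rs h h' ih =>
    rw [ih]
    conv_rhs => rw [pvDecodePure.eq_def]
    simp only [if_neg h, if_neg h']

theorem pvFlatBits_append (a b : List Int) : pvFlatBits (a ++ b) = pvFlatBits a ++ pvFlatBits b := by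
  simp [pvFlatBits]

theorem pvSlice_to_toNat (xs : List Int) (c : Int) (h : 0 ≤ c) :
    PySem.List.slice xs none (some c) = xs.take c.toNat := by
  have hs := PySem.List.slice_to_natCast xs c.toNat
  rw [Int.toNat_of_nonneg h] at hs
  exact hs

theorem pvLoopA_take (rest bits : List Int) (n : Int) :
    (pvLoopA rest bits n).take n.toNat = (bits ++ pvFlatBits (pvDecodePure rest)).take n.toNat := by
  fun_induction pvLoopA rest bits n with
  | case1 bits => simp [pvDecodePure, pvFlatBits]
  | case2 bits flag rs hlen h p ih =>
    rw [ih]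
    have hp : p = (rs.drop (flag + 1).toNat, bits ++ pvFlatBits (rs.take (flag + 1).toNat)) :=
      pvLitrunA_eq (flag + 1) rs bits
    rw [hp]
    conv_rhs => rw [pvDecodePure.eq_def]
    simp only [if_pos h]
    by_cases hc : (0:Int) < flag + 1
    · rw [if_pos hc, pvSlice_to_toNat rs (flag + 1) (by omega)]
      simp [pvFlatBits_append, List.append_assoc]
    · rw [if_neg hc]
      have h0 : (flag + 1).toNat = 0 := by omega
      simp [h0, pvFlatBits]
  | case3 bits flag hlen h h' =>
    conv_rhs => rw [pvDecodePure.eq_def]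
    simp only [if_neg h, if_pos h']
    simp [pvFlatBits]
  | case4 bits flag hlen h h' b rs' ih =>
    rw [ih, pvRepRunA_eq]
    conv_rhs => rw [pvDecodePure.eq_def]
    have hm : (max (257 - flag) 0).toNat = (257 - flag).toNat := by omega
    simp only [if_neg h, if_pos h', hm, pvFlatBits_append, List.append_assoc]
  | case5 bits flag rs hlen h h' ih =>
    rw [ih]
    conv_rhs => rw [pvDecodePure.eq_def]
    simp only [if_neg h, if_neg h']
  | case6 bits flag rs hlen =>
    rw [List.take_append_of_le_length (by simp at hlen ⊢; omega)]

theorem pvFlatBits_take (l : List Int) (k : Nat) :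
    pvFlatBits (l.take k) = (pvFlatBits l).take (8 * k) := by
  induction l generalizing k with
  | nil => simp [pvFlatBits]
  | cons b t ih =>
    cases k with
    | zero => simp [pvFlatBits]
    | succ k =>
      have hc : pvFlatBits (b :: t) = pvBitsOf b ++ pvFlatBits t := by simp [pvFlatBits]
      have hc2 : pvFlatBits (b :: t.take k) = pvBitsOf b ++ pvFlatBits (t.take k) := by
        simp [pvFlatBits]
      have h8 : (pvBitsOf b).length = 8 := rfl
      rw [List.take_succ_cons, hc2, hc, ih,
        show 8 * (k + 1) = (pvBitsOf b).length + 8 * k by rw [h8]; ring,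
        List.take_length_add_append]

theorem pvFoldl_pix (l : List Int) :
    l.foldl (fun acc b => acc ++ pvByteBitsB 8 (PySem.Int.mod b 256) []) [] =
      (pvFlatBits l).map pvPix := by
  rw [PySem.List.foldl_append_eq_flatMap]
  simp only [List.nil_append, pvFlatBits, List.map_flatMap]
  exact List.flatMap_congr (fun b _ => pvByteBitsB_eq b)

theorem pvMain (data : List Int) (width height : Int) :
    decompress_packbits_for_pntg_py data width height
      = decompress_packbits_for_pntg_py_alt data width height := by
  unfold decompress_packbits_for_pntg_py decompress_packbits_for_pntg_py_alt
  by_cases hpos : 0 < width * height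
  · have hn0 : (0:Int) ≤ width * height := le_of_lt hpos
    have hmax : max (width * height) 0 = width * height := by omega
    have hout : pvDecodeB data [] = pvDecodePure data := by simpa using pvDecodeB_pure data []
    have hA' := pvLoopA_take data [] (width * height)
    rw [List.nil_append] at hA'
    simp only [pvSlice_to_toNat _ _ hn0, hA', hmax, hout, pvFoldl_pix, pvFlatBits_take]
    have hnb : (width * height).toNat ≤ 8 * (PySem.Int.floordiv (width * height + 7) 8).toNat := by
      rw [PySem.Int.floordiv_eq_ediv_of_pos (by norm_num)]
      omega
    rw [← List.map_take, List.take_take, min_eq_left hnb,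
      show (fun bit => if bit = 0 then (255:Int) else 0) = pvPix from rfl]
    set P := List.map pvPix ((pvFlatBits (pvDecodePure data)).take (width * height).toNat) with hP
    have hL : P.length ≤ (width * height).toNat := by simp [hP]
    rw [show (width * height - (P.length : Int)).toNat = (width * height).toNat - P.length from by
      omega]
    exact List.take_of_length_le (by simp; omega)
  · have hA : pvLoopA data [] (width * height) = [] := by
      cases data with
      | nil => rw [pvLoopA]
      | cons f rs =>
        rw [pvLoopA.eq_def]
        simp only [List.length_nil, Int.natCast_zero]
        rw [if_neg (by omega)]
    rw [hA]
    simp [PySem.List.slice, show max (width * height) 0 = 0 by omega,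
      show (width * height).toNat = 0 by omega]

-- ===== VERDICT (by name: the statement is the Claim_ definition above) =====
theorem decompress_packbits_for_pntg_py_spec : Claim_equal_decompress_packbits_for_pntg_py := by
  intro data width height _
  exact pvMain data width height
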